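-- pv_equiv track=rewrite | github.com/aditya-prakash-singh/POTD | Day25/main.py | solve
-- ===== SOURCE A (Python) =====
-- def solve(A):
--     l=len(A)
--     ans=0
--     a=["a","e","i","o","u"]
--     for i in range(l):
--         if A[i].lower() in a:
--             ans+=l-i
--     return(ans%10003)
-- ===== SOURCE B (Python) =====
-- def solve(A):
--     c = 0
--     ans = 0
--     for ch in A:
--         if ch.lower() in ("a", "e", "i", "o", "u"):
--             c += 1
--         ans += c
--     return ans % 10003
-- ===== Notes on version B (the rewrite author's own statement) =====
-- stated objective: alternative
-- what changed: Replaces the index loop with per-vowel weight len(A)-i by a single pass over the characters that maintains a running prefix count of vowels and adds it at every position (each vowel contributes 1 to every later position including its own).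
import Mathlib
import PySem

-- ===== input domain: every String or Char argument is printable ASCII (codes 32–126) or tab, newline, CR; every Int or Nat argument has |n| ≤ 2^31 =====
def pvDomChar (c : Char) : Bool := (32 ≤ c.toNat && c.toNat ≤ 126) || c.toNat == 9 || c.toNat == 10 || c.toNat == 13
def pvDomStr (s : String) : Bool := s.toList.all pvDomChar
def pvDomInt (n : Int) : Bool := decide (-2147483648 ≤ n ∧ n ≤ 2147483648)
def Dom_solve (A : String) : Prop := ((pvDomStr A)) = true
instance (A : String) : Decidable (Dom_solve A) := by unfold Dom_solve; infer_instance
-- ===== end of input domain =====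

-- B replaces the len(A)-i positional weight by a running prefix count of vowels added at every position (alternative decomposition, same cost).

-- vowel test shared by both ports: A[i].lower() in ["a","e","i","o","u"]
def isVow (ch : Char) : Bool := ['a','e','i','o','u'].contains (PySem.Chars.lowerChar ch)

-- ===== PORT A =====
def solve (A : String) : Int :=
  let l : Int := (A.toList.length : Int)
  let ans : Int := (PySem.List.enumerate A.toList 0).foldl
    (fun ans p => if isVow p.2 then ans + (l - p.1) else ans) 0
  PySem.Int.mod ans 10003

-- ===== PORT B =====
def solve_alt (A : String) : Int :=
  let r := A.toList.foldl
    (fun s ch =>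
      let c := if isVow ch then s.1 + 1 else s.1
      (c, s.2 + c)) ((0 : Int), (0 : Int))
  PySem.Int.mod r.2 10003

-- ===== PRECONDITION & SPEC =====
def Spec_solve (A : String) (out : Int) : Prop := out = solve_alt A
instance (A : String) (out : Int) : Decidable (Spec_solve A out) := by unfold Spec_solve; infer_instance

-- ===== CLAIM (what is proved, stated in full; the proofs are below) =====
def Claim_equal_solve : Prop := ∀ (A : String), Dom_solve A → Spec_solve A (solve A)

-- ===== LEMMAS AND PROOFS =====

-- total positional weight of the vowels of xs: each vowel at index i of xs contributes len xs - i
def vw : List Char → Int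
  | [] => 0
  | ch :: t => (if isVow ch then (t.length : Int) + 1 else 0) + vw t

theorem foldA_eq_vw (xs : List Char) (l : Int) :
    ∀ (s init : Int), l - s = (xs.length : Int) →
      (PySem.List.enumerate xs s).foldl
        (fun ans p => if isVow p.2 then ans + (l - p.1) else ans) init = init + vw xs := by
  induction xs with
  | nil => intro s init h; simp [PySem.List.enumerate_nil, vw]
  | cons x t ih =>
    intro s init h
    rw [PySem.List.enumerate_cons]
    simp only [List.foldl_cons]
    rw [ih (s + 1) _ (by simp at h ⊢; omega)]
    simp only [vw]
    split <;> [skip; skip] <;> simp at h <;> omega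

theorem foldB_eq_vw (xs : List Char) :
    ∀ (c ans : Int),
      (xs.foldl (fun s ch =>
        let c := if isVow ch then s.1 + 1 else s.1
        (c, s.2 + c)) (c, ans)).2 = ans + c * (xs.length : Int) + vw xs := by
  induction xs with
  | nil => intro c ans; simp [vw]
  | cons x t ih =>
    intro c ans
    simp only [List.foldl_cons]
    by_cases hx : isVow x
    · simp only [hx, if_true, ih]
      simp [vw, hx]
      ring
    · simp only [hx, ih]
      simp [vw, hx]
      ring

-- ===== VERDICT (by name: the statement is the Claim_ definition above) =====
theorem solve_spec : Claim_equal_solve := by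
  intro A _
  simp only [Spec_solve, solve, solve_alt]
  rw [foldA_eq_vw A.toList (A.toList.length : Int) 0 0 (by simp), foldB_eq_vw A.toList 0 0]
  simp
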